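-- pv_equiv track=rewrite | github.com/francescobonifacino/CP | CPPolito/PoliTo Training Contest #18/C.py | is_strongly_composed
-- ===== SOURCE A (Python) =====
-- def is_strongly_composed(numero):
--     divisori = []
--     primi= 0
--     compositi = 0
--     for x in range(2,numero +1):
--         if numero % x == 0:
--             divisori.append(x)
--
--             div = 0
--             for y in range(1,x+1):
--                 if x % y == 0:
--                     div += 1
--
--             if div == 2:
--                 primi +=1
--             else:
--                 compositi += 1
--
--     if primi <= compositi:
--         return 0
--     else:
--         return 1
-- ===== SOURCE B (Python) =====
-- def is_strongly_composed(numero):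
--     # Enumerate divisors in pairs (i, numero // i) for i up to sqrt(numero),
--     # classifying each with a sqrt-bounded primality test.
--     def is_prime(d):
--         if d < 2:
--             return False
--         f = 2
--         while f * f <= d:
--             if d % f == 0:
--                 return False
--             f += 1
--         return True
--
--     primi = 0
--     compositi = 0
--     i = 1
--     while i * i <= numero:
--         if numero % i == 0:
--             q = numero // i
--             for d in ([i] if i == q else [i, q]):
--                 if d >= 2:
--                     if is_prime(d):
--                         primi += 1
--                     else:
--                         compositi += 1
--         i += 1
--     return 1 if primi > compositi else 0
-- ===== Notes on version B (the rewrite author's own statement) =====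
-- stated objective: faster
-- what changed: A scans every x in 2..n and counts all divisors of each divisor x by a full 1..x scan; B enumerates divisors in pairs (i, n//i) for i up to sqrt(n) and classifies each with a sqrt-bounded trial-division primality test.
import Mathlib
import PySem

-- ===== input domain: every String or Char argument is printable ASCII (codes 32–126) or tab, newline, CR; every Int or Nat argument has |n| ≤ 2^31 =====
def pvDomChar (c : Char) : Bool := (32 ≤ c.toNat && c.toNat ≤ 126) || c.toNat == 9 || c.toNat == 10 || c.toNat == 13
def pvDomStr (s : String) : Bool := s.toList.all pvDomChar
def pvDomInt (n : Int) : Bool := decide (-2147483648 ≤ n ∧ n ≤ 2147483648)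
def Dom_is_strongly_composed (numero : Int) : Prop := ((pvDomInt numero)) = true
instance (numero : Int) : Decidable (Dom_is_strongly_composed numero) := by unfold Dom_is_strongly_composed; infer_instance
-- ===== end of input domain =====

-- B replaces A's full 2..n divisor scan (with per-divisor full divisor counting) by
-- sqrt-bounded divisor-pair enumeration plus sqrt-bounded trial-division primality tests.
-- ===== PORT A =====
def is_strongly_composed (numero : Int) : Int :=
  let st : List Int × Int × Int := (PySem.List.pyRange 2 (numero + 1) 1).foldl
    (fun (st : List Int × Int × Int) x =>
      if PySem.Int.mod numero x == 0 then
        let divisori := st.1 ++ [x]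
        let div := (PySem.List.pyRange 1 (x + 1) 1).foldl
          (fun d y => if PySem.Int.mod x y == 0 then d + 1 else d) (0 : Int)
        if div == 2 then (divisori, st.2.1 + 1, st.2.2)
        else (divisori, st.2.1, st.2.2 + 1)
      else st)
    ([], 0, 0)
  if st.2.1 ≤ st.2.2 then 0 else 1


-- ===== PORT B =====
-- B-side helpers: trial-division primality test and the sqrt-bounded divisor-pair loop
def pvIsPrimeLoop : ℕ → Int → Int → Bool
  | 0, _, _ => true
  | fuel + 1, d, f =>
    if f * f ≤ d then
      if PySem.Int.mod d f == 0 then false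
      else pvIsPrimeLoop fuel d (f + 1)
    else true


def pvIsPrime (d : Int) : Bool :=
  if d < 2 then false else pvIsPrimeLoop (d.toNat + 1) d 2


def pvPairLoop : ℕ → Int → Int → Int → Int → Int × Int
  | 0, _, _, primi, compositi => (primi, compositi)
  | fuel + 1, numero, i, primi, compositi =>
    if i * i ≤ numero then
      let q := PySem.Int.floordiv numero i
      let st :=
        if PySem.Int.mod numero i == 0 then
          (if i == q then [i] else [i, q]).foldl
            (fun (st : Int × Int) d =>
              if d ≥ 2 then
                if pvIsPrime d then (st.1 + 1, st.2) else (st.1, st.2 + 1)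
              else st) (primi, compositi)
        else (primi, compositi)
      pvPairLoop fuel numero (i + 1) st.1 st.2
    else (primi, compositi)


def is_strongly_composed_alt (numero : Int) : Int :=
  let st := pvPairLoop (numero.toNat + 1) numero 1 0 0
  if st.1 > st.2 then 1 else 0



-- ===== PRECONDITION & SPEC =====
def Spec_is_strongly_composed (numero : Int) (out : Int) : Prop := out = is_strongly_composed_alt numero
instance (numero : Int) (out : Int) : Decidable (Spec_is_strongly_composed numero out) := by unfold Spec_is_strongly_composed; infer_instance

-- ===== CLAIM (what is proved, stated in full; the proofs are below) =====
def Claim_equal_is_strongly_composed : Prop := ∀ (numero : Int), Dom_is_strongly_composed numero → Spec_is_strongly_composed numero (is_strongly_composed numero)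

-- ===== LEMMAS AND PROOFS =====
def pvDc (x : ℕ) : ℕ := (List.range' 1 x).countP (fun y => x % y == 0)


lemma pv_inner_eq (x : ℕ) :
    (PySem.List.pyRange 1 ((x:Int) + 1) 1).foldl
      (fun d y => if PySem.Int.mod (x:Int) y == 0 then d + 1 else d) 0 = (pvDc x : Int) := by
  rw [PySem.List.pyRange_one, PySem.List.foldl_count_if, List.countP_map]
  have h1 : ((x:Int) + 1 - 1).toNat = x := by omega
  rw [h1, pvDc, List.range'_eq_map_range, List.countP_map]
  norm_num
  apply List.countP_congr
  intro k _
  have : (1 : Int) + (k:Int) = ((1 + k : ℕ) : Int) := by push_cast; ring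
  simp only [Function.comp, this, PySem.Int.mod_natCast, beq_iff_eq]
  omega


lemma pv_dc_two_iff (x : ℕ) (hx : 2 ≤ x) : pvDc x = 2 ↔ Nat.Prime x := by
  have hsplit : List.range' 1 x = 1 :: (List.range' 2 (x - 2) ++ [x]) := by
    have h1 : x = (x - 1) + 1 := by omega
    rw [h1, List.range'_succ]
    congr 1
    have h2 : x - 1 = (x - 2) + 1 := by omega
    rw [h2, List.range'_1_concat]
    congr 2
    omega
  have hmid : pvDc x = (List.range' 2 (x - 2)).countP (fun y => x % y == 0) + 2 := by
    rw [pvDc, hsplit]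
    simp only [List.countP_cons, List.countP_append, Nat.mod_self, Nat.mod_one]
    norm_num
  rw [hmid, Nat.prime_def_lt]
  have hz : (List.range' 2 (x - 2)).countP (fun y => x % y == 0) + 2 = 2 ↔
      (List.range' 2 (x - 2)).countP (fun y => x % y == 0) = 0 := by omega
  rw [hz, List.countP_eq_zero]
  constructor
  · intro h
    refine ⟨hx, fun m hm hdvd => ?_⟩
    by_contra hne
    have hm0 : 0 < m := by
      rcases Nat.eq_zero_or_pos m with h0 | h0
      · subst h0; simp at hdvd; omega
      · exact h0
    have hm2 : 2 ≤ m := by omega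
    have := h m (by simp [List.mem_range'_1]; omega)
    rw [Nat.dvd_iff_mod_eq_zero] at hdvd
    simp [hdvd] at this
  · rintro ⟨-, h⟩ y hy
    simp only [List.mem_range'_1] at hy
    simp only [beq_iff_eq]
    intro hmod
    have hdvd : y ∣ x := Nat.dvd_iff_mod_eq_zero.mpr hmod
    have := h y (by omega) hdvd
    omega


def pvDivL (n : ℕ) : List ℕ := (List.range' 1 n).filter (fun d => n % d == 0)

def pvPP (d : ℕ) : Bool := decide (Nat.Prime d)

def pvCP (d : ℕ) : Bool := decide (2 ≤ d) && !decide (Nat.Prime d)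


def pvInner (x : Int) : Int :=
  (PySem.List.pyRange 1 (x + 1) 1).foldl
    (fun d y => if PySem.Int.mod x y == 0 then d + 1 else d) 0


lemma pv_foldA (n : Int) (xs : List Int) (st : List Int × Int × Int) :
    (xs.foldl
      (fun (st : List Int × Int × Int) x =>
        if PySem.Int.mod n x == 0 then
          let divisori := st.1 ++ [x]
          let div := (PySem.List.pyRange 1 (x + 1) 1).foldl
            (fun d y => if PySem.Int.mod x y == 0 then d + 1 else d) (0 : Int)
          if div == 2 then (divisori, st.2.1 + 1, st.2.2)
          else (divisori, st.2.1, st.2.2 + 1)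
        else st) st).2 =
      (st.2.1 + (xs.countP (fun x => (PySem.Int.mod n x == 0) && (pvInner x == 2)) : ℕ),
       st.2.2 + (xs.countP (fun x => (PySem.Int.mod n x == 0) && !(pvInner x == 2)) : ℕ)) := by
  induction xs generalizing st with
  | nil => simp
  | cons x t ih =>
    rw [List.foldl_cons, ih, List.countP_cons, List.countP_cons]
    by_cases h1 : (PySem.Int.mod n x == 0) = true
    · by_cases h2 : ((PySem.List.pyRange 1 (x + 1) 1).foldl
          (fun d y => if PySem.Int.mod x y == 0 then d + 1 else d) (0 : Int) == 2) = true
      · simp only [pvInner, h1, h2]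
        simp
        omega
      · rw [Bool.not_eq_true] at h2
        simp only [pvInner, h1, h2]
        simp
        omega
    · rw [Bool.not_eq_true] at h1
      simp only [pvInner, h1]
      simp


lemma pv_pyRange_cast (a b : ℕ) :
    PySem.List.pyRange (a:Int) (b:Int) 1 = (List.range' a (b - a)).map (fun d : ℕ => (d : Int)) := by
  rw [PySem.List.pyRange_one, List.range'_eq_map_range]
  have h : ((b:Int) - a).toNat = b - a := by omega
  rw [h, List.map_map]
  apply List.map_congr_left
  intro k _
  simp [Function.comp]


lemma pv_countA (n : ℕ) (hn : 1 ≤ n) :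
    ((PySem.List.pyRange 2 ((n:Int) + 1) 1).countP
        (fun x => (PySem.Int.mod (n:Int) x == 0) && (pvInner x == 2)) = (pvDivL n).countP pvPP)
    ∧ ((PySem.List.pyRange 2 ((n:Int) + 1) 1).countP
        (fun x => (PySem.Int.mod (n:Int) x == 0) && !(pvInner x == 2)) = (pvDivL n).countP pvCP) := by
  have hr : PySem.List.pyRange 2 ((n:Int) + 1) 1 =
      (List.range' 2 (n - 1)).map (fun d : ℕ => (d : Int)) := by
    have h2 : ((2:ℕ):Int) = 2 := by norm_num
    have h3 : (((n+1):ℕ):Int) = (n:Int) + 1 := by push_cast; ring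
    rw [← h2, ← h3, pv_pyRange_cast]
    have h4 : n + 1 - 2 = n - 1 := by omega
    rw [h4]
  have h1 : List.range' 1 n = 1 :: List.range' 2 (n - 1) := by
    have h : n = (n - 1) + 1 := by omega
    rw [h, List.range'_succ]
    have h5 : n - 1 + 1 - 1 = n - 1 := by omega
    rw [h5]
  have hdiv : ∀ (q : ℕ → Bool), q 1 = false → (pvDivL n).countP q =
      (List.range' 2 (n - 1)).countP (fun d => q d && (n % d == 0)) := by
    intro q hq
    rw [pvDivL, List.countP_filter, h1, List.countP_cons]
    simp [hq]
  constructor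
  · rw [hr, List.countP_map, hdiv pvPP (by simp [pvPP, Nat.not_prime_one])]
    apply List.countP_congr
    intro d hd
    simp only [List.mem_range'_1] at hd
    have hd2 : 2 ≤ d := hd.1
    simp only [Function.comp, pvInner]
    rw [pv_inner_eq d]
    simp only [PySem.Int.mod_natCast, pvPP, Bool.and_eq_true, beq_iff_eq, decide_eq_true_iff]
    rw [← pv_dc_two_iff d hd2]
    omega
  · rw [hr, List.countP_map, hdiv pvCP (by simp [pvCP])]
    apply List.countP_congr
    intro d hd
    simp only [List.mem_range'_1] at hd
    have hd2 : 2 ≤ d := hd.1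
    simp only [Function.comp, pvInner]
    rw [pv_inner_eq d]
    simp only [PySem.Int.mod_natCast, pvCP, Bool.and_eq_true, Bool.not_eq_true',
      beq_iff_eq, beq_eq_false_iff_ne, decide_eq_true_iff, decide_eq_false_iff_not]
    rw [← pv_dc_two_iff d hd2]
    omega


lemma pv_prime_loop (k : ℕ) : ∀ (d f : ℕ), d + 1 - f ≤ k → 2 ≤ f →
    (pvIsPrimeLoop k (d:Int) (f:Int) = true ↔ ∀ m, f ≤ m → m * m ≤ d → d % m ≠ 0) := by
  induction k with
  | zero =>
    intro d f hk hf
    simp only [show pvIsPrimeLoop 0 (d:Int) (f:Int) = true from rfl, eq_self_iff_true, true_iff]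
    intro m hm hmm
    have : d < f := by omega
    nlinarith
  | succ k ih =>
    intro d f hk hf
    rw [pvIsPrimeLoop]
    by_cases hc : ((f:Int) * (f:Int) ≤ (d:Int))
    · rw [if_pos hc]
      have hffd : f * f ≤ d := by exact_mod_cast hc
      by_cases hm : d % f = 0
      · have hb : (PySem.Int.mod (d:Int) (f:Int) == 0) = true := by
          simp [PySem.Int.mod_natCast, hm]
        rw [hb]
        simp only [if_true]
        constructor
        · intro hfalse
          exact absurd hfalse (by simp)
        · intro h
          exact absurd hm (h f le_rfl hffd)
      · have hb : (PySem.Int.mod (d:Int) (f:Int) == 0) = false := by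
          simp only [PySem.Int.mod_natCast, beq_eq_false_iff_ne, ne_eq]
          omega
        rw [hb]
        simp only [Bool.false_eq_true, if_false]
        have hrec : ((f:Int) + 1) = (((f+1) : ℕ):Int) := by push_cast; ring
        rw [hrec, ih d (f+1) (by omega) (by omega)]
        constructor
        · intro h m hmf hmm
          rcases Nat.eq_or_lt_of_le hmf with h1 | h1
          · subst h1; exact hm
          · exact h m (by omega) hmm
        · intro h m hmf hmm
          exact h m (by omega) hmm
    · rw [if_neg hc]
      simp only [true_iff]
      intro m hm hmm hdm
      have : ¬ (f * f ≤ d) := by exact_mod_cast hc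
      have : m * m ≥ f * f := Nat.mul_le_mul hm hm
      omega

lemma pv_isPrime_iff (d : ℕ) : pvIsPrime (d:Int) = decide (Nat.Prime d) := by
  by_cases hd : d < 2
  · have hc : (d:Int) < 2 := by exact_mod_cast hd
    have : ¬ Nat.Prime d := by
      intro hp
      have := hp.two_le
      omega
    simp [pvIsPrime, hc, this]
  · push_neg at hd
    have hc : ¬ ((d:Int) < 2) := by exact_mod_cast not_lt.mpr hd
    rw [pvIsPrime, if_neg hc]
    have h2 : ((2:Int)) = (((2:ℕ)):Int) := by norm_num
    simp only [Int.toNat_natCast]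
    rw [h2, Bool.eq_iff_iff]
    rw [pv_prime_loop (d + 1) d 2 (by omega) le_rfl]
    rw [decide_eq_true_iff, Nat.prime_def_le_sqrt]
    constructor
    · intro h
      refine ⟨hd, fun m hm hms hdvd => ?_⟩
      exact h m hm (Nat.le_sqrt.mp hms) (Nat.dvd_iff_mod_eq_zero.mp hdvd)
    · rintro ⟨-, h⟩ m hm hmm hdm
      exact h m hm (Nat.le_sqrt.mpr hmm) (Nat.dvd_iff_mod_eq_zero.mpr hdm)


lemma pv_classify (ds : List ℕ) (p c : Int) :
    ((ds.map (fun d : ℕ => (d : Int))).foldl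
      (fun (st : Int × Int) d =>
        if d ≥ 2 then
          if pvIsPrime d then (st.1 + 1, st.2) else (st.1, st.2 + 1)
        else st) (p, c)) =
      (p + (ds.countP pvPP : ℕ), c + (ds.countP pvCP : ℕ)) := by
  induction ds generalizing p c with
  | nil => simp
  | cons d t ih =>
    rw [List.map_cons, List.foldl_cons, List.countP_cons, List.countP_cons]
    by_cases h2 : 2 ≤ d
    · have hc : ((d:Int) ≥ 2) := by exact_mod_cast h2
      rw [if_pos hc, pv_isPrime_iff d]
      by_cases hp : Nat.Prime d
      · simp only [hp, decide_true, if_true, ih]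
        have c1 : pvPP d = true := by simp [pvPP, hp]
        have c2 : pvCP d = false := by simp [pvCP, hp]
        rw [c1, c2]
        simp
        omega
      · simp only [hp, decide_false, Bool.false_eq_true, if_false, ih]
        have c1 : pvPP d = false := by simp [pvPP, hp]
        have c2 : pvCP d = true := by simp [pvCP, hp, h2]
        rw [c1, c2]
        simp
        omega
    · have hc : ¬((d:Int) ≥ 2) := by exact_mod_cast h2
      rw [if_neg hc, ih]
      have c1 : pvPP d = false := by
        simp only [pvPP, decide_eq_false_iff_not]
        intro hp
        exact h2 hp.two_le
      have c2 : pvCP d = false := by simp [pvCP]; omega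
      rw [c1, c2]
      simp


def pvBlock (n i : ℕ) : List ℕ :=
  if n % i = 0 then (if i = n / i then [i] else [i, n / i]) else []


def pvPairTail (n i : ℕ) : List ℕ :=
  (List.range' i (Nat.sqrt n + 1 - i)).flatMap (pvBlock n)


lemma pv_pairLoop (k : ℕ) : ∀ (n i : ℕ) (p c : Int), Nat.sqrt n + 1 - i ≤ k → 1 ≤ i →
    pvPairLoop k (n:Int) (i:Int) p c =
      (p + ((pvPairTail n i).countP pvPP : ℕ), c + ((pvPairTail n i).countP pvCP : ℕ)) := by
  induction k with
  | zero =>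
    intro n i p c hk hi
    have h0 : pvPairLoop 0 (n:Int) (i:Int) p c = (p, c) := rfl
    rw [h0]
    have ht : pvPairTail n i = [] := by
      rw [pvPairTail]
      have : Nat.sqrt n + 1 - i = 0 := by omega
      rw [this]
      simp
    rw [ht]
    simp
  | succ k ih =>
    intro n i p c hk hi
    rw [pvPairLoop]
    by_cases hc : ((i:Int) * (i:Int) ≤ (n:Int))
    · rw [if_pos hc]
      have hii : i * i ≤ n := by exact_mod_cast hc
      have his : i ≤ Nat.sqrt n := Nat.le_sqrt.mpr hii
      have hsplit : pvPairTail n i = pvBlock n i ++ pvPairTail n (i + 1) := by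
        rw [pvPairTail, pvPairTail]
        have h : Nat.sqrt n + 1 - i = (Nat.sqrt n + 1 - (i + 1)) + 1 := by omega
        rw [h, List.range'_succ]
        simp
      rw [hsplit, List.countP_append, List.countP_append]
      have hrec : ((i:Int) + 1) = (((i+1) : ℕ):Int) := by push_cast; ring
      by_cases hm : n % i = 0
      · have hb : (PySem.Int.mod (n:Int) (i:Int) == 0) = true := by
          simp [PySem.Int.mod_natCast, hm]
        have hq : PySem.Int.floordiv (n:Int) (i:Int) = ((n / i : ℕ) : Int) :=
          PySem.Int.floordiv_natCast n i
        simp only [hb, if_true, hq]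
        by_cases he : i = n / i
        · have hbe : ((i:Int) == ((n / i : ℕ) : Int)) = true := by
            simp only [beq_iff_eq, Int.natCast_inj]
            exact he
          simp only [hbe, if_true]
          have hl : ([(i:Int)]) = ([i] : List ℕ).map (fun d : ℕ => (d : Int)) := by simp
          rw [hl, pv_classify]
          rw [hrec, ih n (i+1) _ _ (by omega) (by omega)]
          have hblock : pvBlock n i = [i] := by rw [pvBlock, if_pos hm, if_pos he]
          rw [hblock]
          simp only [Prod.mk.injEq]
          constructor <;> push_cast <;> ring
        · have hbe : ((i:Int) == ((n / i : ℕ) : Int)) = false := by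
            simp only [beq_eq_false_iff_ne, ne_eq, Int.natCast_inj]
            exact he
          simp only [hbe, Bool.false_eq_true, if_false]
          have hl : ([(i:Int), ((n / i : ℕ) : Int)]) = ([i, n / i] : List ℕ).map (fun d : ℕ => (d : Int)) := by simp
          rw [hl, pv_classify]
          rw [hrec, ih n (i+1) _ _ (by omega) (by omega)]
          have hblock : pvBlock n i = [i, n / i] := by rw [pvBlock, if_pos hm, if_neg he]
          rw [hblock]
          simp only [Prod.mk.injEq]
          constructor <;> push_cast <;> ring
      · have hb : (PySem.Int.mod (n:Int) (i:Int) == 0) = false := by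
          simp only [PySem.Int.mod_natCast, beq_eq_false_iff_ne, ne_eq]
          omega
        simp only [hb, Bool.false_eq_true, if_false]
        rw [hrec, ih n (i+1) _ _ (by omega) (by omega)]
        have hblock : pvBlock n i = [] := by rw [pvBlock, if_neg hm]
        rw [hblock]
        simp
    · rw [if_neg hc]
      have hgt : Nat.sqrt n < i := by
        by_contra hle
        exact hc (by exact_mod_cast Nat.le_sqrt.mp (by omega))
      have ht : pvPairTail n i = [] := by
        rw [pvPairTail]
        have : Nat.sqrt n + 1 - i = 0 := by omega
        rw [this]
        simp
      rw [ht]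
      simp


lemma pv_mem_divL (n d : ℕ) : d ∈ pvDivL n ↔ 1 ≤ d ∧ d ≤ n ∧ n % d = 0 := by
  simp only [pvDivL, List.mem_filter, List.mem_range'_1, beq_iff_eq]
  omega


lemma pv_mem_block (n i a : ℕ) : a ∈ pvBlock n i ↔ n % i = 0 ∧ (a = i ∨ a = n / i) := by
  rw [pvBlock]
  split_ifs with h1 h2
  · simp [h1, ← h2]
  · simp [h1]
  · simp [h1]


lemma pv_perm (n : ℕ) (hn : 1 ≤ n) :
    ((List.range' 1 (Nat.sqrt n)).flatMap (pvBlock n)).Perm (pvDivL n) := by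
  have hnd1 : ((List.range' 1 (Nat.sqrt n)).flatMap (pvBlock n)).Nodup := by
    rw [List.nodup_flatMap]
    constructor
    · intro i _
      rw [pvBlock]
      split_ifs with h1 h2
      · exact List.nodup_singleton i
      · simp [h2]
      · exact List.nodup_nil
    · have hp : (List.range' 1 (Nat.sqrt n)).Pairwise (· < ·) :=
        List.pairwise_lt_range' 1
      refine List.Pairwise.imp_of_mem ?_ hp
      intro i j hi hj hij a hai haj
      rw [List.mem_range'_1] at hi hj
      rw [pv_mem_block] at hai haj
      obtain ⟨hmi, hci⟩ := hai
      obtain ⟨hmj, hcj⟩ := haj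
      have hdi : i ∣ n := Nat.dvd_iff_mod_eq_zero.mpr hmi
      have hdj : j ∣ n := Nat.dvd_iff_mod_eq_zero.mpr hmj
      have hmuli : i * (n / i) = n := Nat.mul_div_cancel' hdi
      have hmulj : j * (n / j) = n := Nat.mul_div_cancel' hdj
      have hjj : j * j ≤ n := Nat.le_sqrt.mp (by omega)
      have hi1 : 1 ≤ i := hi.1
      have hj1 : 1 ≤ j := hj.1
      rcases hci with rfl | rfl <;> rcases hcj with h | h
      · omega
      · -- a = i and a = n / j : n = j * i with i < j ≤ sqrt n
        nlinarith
      · -- a = n / i and a = j : n = i * j with i < j ≤ sqrt n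
        nlinarith
      · -- n / i = n / j
        have hpos : 0 < n / i := Nat.div_pos (Nat.le_of_dvd (by omega) hdi) (by omega)
        have : i = j := by
          apply Nat.eq_of_mul_eq_mul_right hpos
          rw [hmuli, h, hmulj]
        omega
  apply (List.perm_ext_iff_of_nodup hnd1 ((List.nodup_range' 1).filter _)).mpr
  intro d
  rw [show ((List.range' 1 n).filter (fun d => n % d == 0)) = pvDivL n from rfl, pv_mem_divL,
    List.mem_flatMap]
  constructor
  · rintro ⟨i, hi, hd⟩
    rw [List.mem_range'_1] at hi
    rw [pv_mem_block] at hd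
    obtain ⟨hm, hcase⟩ := hd
    have hdi : i ∣ n := Nat.dvd_iff_mod_eq_zero.mpr hm
    have hsn : Nat.sqrt n ≤ n := Nat.sqrt_le_self n
    rcases hcase with rfl | rfl
    · exact ⟨hi.1, by omega, hm⟩
    · refine ⟨Nat.div_pos (Nat.le_of_dvd (by omega) hdi) (by omega), Nat.div_le_self n i,
        Nat.dvd_iff_mod_eq_zero.mp (Nat.div_dvd_of_dvd hdi)⟩
  · rintro ⟨h1, h2, h3⟩
    have hdvd : d ∣ n := Nat.dvd_iff_mod_eq_zero.mpr h3
    have hmul : d * (n / d) = n := Nat.mul_div_cancel' hdvd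
    by_cases hds : d ≤ Nat.sqrt n
    · exact ⟨d, by rw [List.mem_range'_1]; omega, by rw [pv_mem_block]; exact ⟨h3, Or.inl rfl⟩⟩
    · have hd2 : Nat.sqrt n < d := by omega
      have hdd : n < d * d := Nat.sqrt_lt.mp hd2
      have hlt : n / d < d := by nlinarith
      have e1 : 1 ≤ n / d := Nat.div_pos h2 (by omega)
      have hnd : n / d ≤ Nat.sqrt n := by
        apply Nat.le_sqrt.mpr
        nlinarith
      refine ⟨n / d, by rw [List.mem_range'_1]; omega, ?_⟩
      rw [pv_mem_block]
      refine ⟨Nat.dvd_iff_mod_eq_zero.mp (Nat.div_dvd_of_dvd hdvd), Or.inr ?_⟩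
      have hdd2 : n / (n / d) = d := Nat.div_div_self hdvd (by omega)
      omega


lemma pv_A_char (n : ℕ) (hn : 1 ≤ n) :
    is_strongly_composed (n:Int) =
      if (pvDivL n).countP pvPP ≤ (pvDivL n).countP pvCP then 0 else 1 := by
  simp only [is_strongly_composed]
  rw [pv_foldA]
  rw [(pv_countA n hn).1, (pv_countA n hn).2]
  simp only [zero_add]
  by_cases h : (pvDivL n).countP pvPP ≤ (pvDivL n).countP pvCP
  · rw [if_pos (by exact_mod_cast h), if_pos h]
  · rw [if_neg (by exact_mod_cast h), if_neg h]


lemma pv_B_char (n : ℕ) (hn : 1 ≤ n) :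
    is_strongly_composed_alt (n:Int) =
      if (pvDivL n).countP pvCP < (pvDivL n).countP pvPP then 1 else 0 := by
  simp only [is_strongly_composed_alt, Int.toNat_natCast]
  have h1 : (1 : Int) = ((1:ℕ):Int) := by norm_num
  have hsl := Nat.sqrt_le_self n
  rw [h1]
  simp only [pv_pairLoop (n + 1) n 1 0 0 (by omega) le_rfl]
  have hs : Nat.sqrt n + 1 - 1 = Nat.sqrt n := by omega
  have hperm := pv_perm n hn
  rw [pvPairTail, hs] at *
  rw [hperm.countP_eq pvPP, hperm.countP_eq pvCP]
  simp only [zero_add]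
  by_cases h : (pvDivL n).countP pvCP < (pvDivL n).countP pvPP
  · rw [if_pos (by exact_mod_cast h), if_pos h]
  · rw [if_neg (by exact_mod_cast h), if_neg h]


theorem pv_main : ∀ (numero : Int), is_strongly_composed numero = is_strongly_composed_alt numero := by
  intro numero
  by_cases h0 : numero ≤ 0
  · have hA : is_strongly_composed numero = 0 := by
      simp only [is_strongly_composed]
      rw [PySem.List.pyRange_one_eq_nil (by omega)]
      simp
    have hB : is_strongly_composed_alt numero = 0 := by
      simp only [is_strongly_composed_alt]
      rw [pvPairLoop]
      rw [if_neg (by omega : ¬ ((1:Int) * 1 ≤ numero))]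
      simp
    rw [hA, hB]
  · have h1 : 0 < numero := by omega
    obtain ⟨n, rfl⟩ : ∃ n : ℕ, numero = (n:Int) := ⟨numero.toNat, by omega⟩
    have hn : 1 ≤ n := by exact_mod_cast h1
    rw [pv_A_char n hn, pv_B_char n hn]
    split_ifs with a b <;> omega

-- ===== VERDICT (by name: the statement is the Claim_ definition above) =====
theorem is_strongly_composed_spec : Claim_equal_is_strongly_composed := by
  intro numero _
  unfold Spec_is_strongly_composed
  exact pv_main numero
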